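-- pv_equiv track=rewrite | github.com/prithaghosh/sars_cov2_scripts | find_pockets_from_ss_5P.py | add_small_p
-- ===== SOURCE A (Python) =====
-- def add_small_p(pocket_P, pairs_P):
--
--     pocket_p = pocket_P.copy()
--
--     for i in range(0, len(pocket_P)):
--         if pocket_P[i] == "P":
--              for k in range(0, len(pairs_P)):
--                 if (pairs_P[k][0] == i) and (pocket_P[pairs_P[k][1]] == "_"):
--                     pocket_p[pairs_P[k][1]] = "p"
--                 elif (pairs_P[k][1] == i) and (pocket_P[pairs_P[k][0]] == "_"):
--                     pocket_p[pairs_P[k][0]] = "p"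
--     return "".join(pocket_p)
-- ===== SOURCE B (Python) =====
-- def add_small_p(pocket_P, pairs_P):
--     p_positions = {i for i, c in enumerate(pocket_P) if c == "P"}
--     out = list(pocket_P)
--     for a, b in pairs_P:
--         if a in p_positions and pocket_P[b] == "_":
--             out[b] = "p"
--         if b in p_positions and pocket_P[a] == "_":
--             out[a] = "p"
--     return "".join(out)
-- ===== Notes on version B (the rewrite author's own statement) =====
-- stated objective: alternative
-- what changed: A rescans the whole pair list once per 'P' position (nested loops); B precomputes the set of P positions once, makes a single pass over the pairs, and writes 'p' into a copy directly; Pre_ excludes inputs where A raises IndexError (a pair one side of which is a valid P position while the other side is out of range).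
import Mathlib
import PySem

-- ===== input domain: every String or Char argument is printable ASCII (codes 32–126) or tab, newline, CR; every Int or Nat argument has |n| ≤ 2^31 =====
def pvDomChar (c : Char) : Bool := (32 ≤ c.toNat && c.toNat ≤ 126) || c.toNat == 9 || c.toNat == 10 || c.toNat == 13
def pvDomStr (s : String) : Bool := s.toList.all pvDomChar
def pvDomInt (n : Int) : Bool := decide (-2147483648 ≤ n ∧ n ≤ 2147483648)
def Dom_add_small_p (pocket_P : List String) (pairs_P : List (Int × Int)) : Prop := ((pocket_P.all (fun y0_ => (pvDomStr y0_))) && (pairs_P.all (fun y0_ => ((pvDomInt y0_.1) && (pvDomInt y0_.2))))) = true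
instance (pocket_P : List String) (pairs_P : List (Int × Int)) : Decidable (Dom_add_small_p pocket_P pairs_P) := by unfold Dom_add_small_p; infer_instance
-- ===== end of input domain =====

-- B precomputes the set of 'P' positions once and makes a single pass over the pairs, writing 'p'
-- into a copy directly, instead of A's rescan of the whole pair list per 'P' position; objective: alternative.

-- ===== PORT A =====
-- Out-of-range index reads use the default "" and out-of-range writes are no-ops; Python raises IndexError
-- there, and exactly those inputs are excluded by Pre_ below.
def add_small_p (pocket_P : List String) (pairs_P : List (Int × Int)) : String :=
  let pocket_p := (PySem.List.pyRange 0 (PySem.List.len pocket_P) 1).foldl (fun acc i =>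
    if PySem.List.pyGetD pocket_P i "" = "P" then
      (PySem.List.pyRange 0 (PySem.List.len pairs_P) 1).foldl (fun acc2 k =>
        let pr := PySem.List.pyGetD pairs_P k (0, 0)
        if pr.1 = i ∧ PySem.List.pyGetD pocket_P pr.2 "" = "_" then
          PySem.List.pySetD acc2 pr.2 "p"
        else if pr.2 = i ∧ PySem.List.pyGetD pocket_P pr.1 "" = "_" then
          PySem.List.pySetD acc2 pr.1 "p"
        else acc2) acc
    else acc) pocket_P
  PySem.Str.join "" pocket_p

-- ===== PORT B =====
def add_small_p_alt (pocket_P : List String) (pairs_P : List (Int × Int)) : String :=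
  let p_positions : PySem.Set Int :=
    PySem.Set.ofList (((PySem.List.enumerate pocket_P 0).filter (fun jc => jc.2 == "P")).map Prod.fst)
  let out := pairs_P.foldl (fun out p =>
    let out1 := if PySem.Set.contains p_positions p.1 && (PySem.List.pyGetD pocket_P p.2 "" == "_")
                then PySem.List.pySetD out p.2 "p" else out
    if PySem.Set.contains p_positions p.2 && (PySem.List.pyGetD pocket_P p.1 "" == "_")
    then PySem.List.pySetD out1 p.1 "p" else out1) pocket_P
  PySem.Str.join "" out

-- ===== PRECONDITION & SPEC =====
-- Pre_ excludes exactly the inputs on which Python A raises IndexError: a pair whose one side names a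
-- valid 'P' position while its other side is an out-of-range index.
def Pre_add_small_p (pocket_P : List String) (pairs_P : List (Int × Int)) : Prop :=
  ∀ p ∈ pairs_P,
    ((0 ≤ p.1 ∧ PySem.List.pyGet? pocket_P p.1 = some "P") → PySem.Raise.InRange pocket_P.length p.2) ∧
    ((0 ≤ p.2 ∧ PySem.List.pyGet? pocket_P p.2 = some "P") → PySem.Raise.InRange pocket_P.length p.1)
instance (pocket_P : List String) (pairs_P : List (Int × Int)) : Decidable (Pre_add_small_p pocket_P pairs_P) := by unfold Pre_add_small_p; infer_instance

def pvWitness_add_small_p : List String × (List (Int × Int)) := (["P", "_", "x"], [(0, 1), (2, 0)])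

def Spec_add_small_p (pocket_P : List String) (pairs_P : List (Int × Int)) (out : String) : Prop := out = add_small_p_alt pocket_P pairs_P
instance (pocket_P : List String) (pairs_P : List (Int × Int)) (out : String) : Decidable (Spec_add_small_p pocket_P pairs_P out) := by unfold Spec_add_small_p; infer_instance

-- ===== CLAIM (what is proved, stated in full; the proofs are below) =====
def Claim_equal_add_small_p : Prop := ∀ (pocket_P : List String) (pairs_P : List (Int × Int)), Dom_add_small_p pocket_P pairs_P → Pre_add_small_p pocket_P pairs_P → Spec_add_small_p pocket_P pairs_P (add_small_p pocket_P pairs_P)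


-- ===== LEMMAS AND PROOFS =====

-- read pocket_P[x] with default "" (the shape both ports use)
abbrev pget (l : List String) (x : Int) : String := PySem.List.pyGetD l x ""

-- the port's set of 'P' positions
abbrev pposB (l : List String) : PySem.Set Int :=
  PySem.Set.ofList (((PySem.List.enumerate l 0).filter (fun jc => jc.2 == "P")).map Prod.fst)

-- "l with every position in S replaced by "p"" — the common normal form of both programs' results
def MkL (l : List String) (S : List Int) : List String :=
  (PySem.List.enumerate l 0).map (fun jc => if jc.1 ∈ S then "p" else jc.2)

theorem MkL_congr {l : List String} {S T : List Int} (h : ∀ j, j ∈ S ↔ j ∈ T) :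
    MkL l S = MkL l T := by
  unfold MkL
  exact List.map_congr_left (fun jc _ => by rw [if_congr (h jc.1) rfl rfl])

theorem MkL_nil (l : List String) : MkL l [] = l := by
  simp [MkL]

theorem length_MkL (l : List String) (S : List Int) : (MkL l S).length = l.length := by
  simp [MkL]

theorem getElem_MkL (l : List String) (S : List Int) (k : Nat) (hk : k < l.length) :
    (MkL l S)[k]'(by rw [length_MkL]; exact hk) = if (k : Int) ∈ S then "p" else l[k] := by
  simp [MkL, PySem.List.getElem_enumerate]

theorem set_MkL (l : List String) (S : List Int) (j : Nat) (_hj : j < l.length) :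
    (MkL l S).set j "p" = MkL l ((j : Int) :: S) := by
  apply List.ext_getElem (by simp [length_MkL])
  intro k h1 h2
  have hk : k < l.length := by simpa [length_MkL] using h2
  rw [List.getElem_set, getElem_MkL l S k hk, getElem_MkL l _ k hk]
  by_cases hjk : j = k
  · simp [hjk]
  · simp [List.mem_cons, Nat.cast_inj, hjk, Ne.symm hjk]

theorem pyIdx_mod (n : Nat) (x : Int) (h1 : -(n : Int) ≤ x) (h2 : x < n) :
    PySem.List.pyIdx? n x = some (PySem.Int.mod x n).toNat := by
  unfold PySem.List.pyIdx? PySem.Int.mod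
  rw [Int.fmod_eq_emod, if_pos (Or.inl (Int.natCast_nonneg n)), add_zero]
  rcases le_or_gt 0 x with hx | hx
  · rw [if_pos hx, if_pos h2, Int.emod_eq_of_lt hx h2]
  · rw [if_neg (by omega), if_pos h1]
    have : x % (n : Int) = x + n := by
      rw [show x = (x + n) + n * (-1) by ring, Int.add_mul_emod_self_left,
        Int.emod_eq_of_lt (by omega) (by omega)]
      ring
    rw [this]; congr 1; omega

theorem inRange_of_pget (l : List String) (x : Int) (hx : pget l x = "_") :
    -(l.length : Int) ≤ x ∧ x < l.length := by
  by_contra h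
  have hnone : PySem.List.pyGet? l x = none := by
    rw [PySem.List.pyGet?_eq_none_iff]
    intro hr
    rcases hr with ⟨a, b⟩
    omega
  unfold pget PySem.List.pyGetD at hx
  rw [hnone] at hx
  simp at hx

theorem pySetD_MkL (l : List String) (S : List Int) (x : Int) (hx : pget l x = "_") :
    PySem.List.pySetD (MkL l S) x "p" = MkL l (PySem.Int.mod x l.length :: S) := by
  obtain ⟨h1, h2⟩ := inRange_of_pget l x hx
  have hn : 0 < (l.length : Int) := by omega
  have hmn : 0 ≤ PySem.Int.mod x l.length := PySem.Int.mod_nonneg x hn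
  have hml : PySem.Int.mod x l.length < l.length := PySem.Int.mod_lt x hn
  unfold PySem.List.pySetD PySem.List.pySet?
  rw [length_MkL, pyIdx_mod l.length x h1 h2, Option.map_some, Option.getD_some,
    set_MkL l S _ (by omega)]
  rw [Int.toNat_of_nonneg hmn]

-- contribution of pair p at outer index i in A's inner loop
def cA (l : List String) (i : Int) (p : Int × Int) : List Int :=
  if p.1 = i ∧ pget l p.2 = "_" then [PySem.Int.mod p.2 l.length]
  else if p.2 = i ∧ pget l p.1 = "_" then [PySem.Int.mod p.1 l.length] else []

theorem foldA_inner (l : List String) (i : Int) (pairs : List (Int × Int)) :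
    ∀ S : List Int,
      pairs.foldl (fun acc2 pr =>
        if pr.1 = i ∧ pget l pr.2 = "_" then PySem.List.pySetD acc2 pr.2 "p"
        else if pr.2 = i ∧ pget l pr.1 = "_" then PySem.List.pySetD acc2 pr.1 "p"
        else acc2) (MkL l S)
      = MkL l (pairs.flatMap (cA l i) ++ S) := by
  induction pairs with
  | nil => intro S; simp
  | cons p ps ih =>
    intro S
    simp only [List.foldl_cons, List.flatMap_cons]
    by_cases h1 : p.1 = i ∧ pget l p.2 = "_"
    · rw [if_pos h1, pySetD_MkL l S p.2 h1.2, ih]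
      apply MkL_congr; intro j
      simp only [cA, if_pos h1, List.mem_append, List.mem_cons]
      tauto
    · rw [if_neg h1]
      by_cases h2 : p.2 = i ∧ pget l p.1 = "_"
      · rw [if_pos h2, pySetD_MkL l S p.1 h2.2, ih]
        apply MkL_congr; intro j
        simp only [cA, if_neg h1, if_pos h2, List.mem_append, List.mem_cons]
        tauto
      · rw [if_neg h2, ih]
        apply MkL_congr; intro j
        simp only [cA, if_neg h1, if_neg h2, List.nil_append, List.mem_append]

-- contribution of outer index i in A
def oc (l : List String) (pairs : List (Int × Int)) (i : Int) : List Int :=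
  if pget l i = "P" then pairs.flatMap (cA l i) else []

theorem foldA_outer (l : List String) (pairs : List (Int × Int)) (is : List Int) :
    ∀ S : List Int,
      is.foldl (fun acc i =>
        if pget l i = "P" then
          pairs.foldl (fun acc2 pr =>
            if pr.1 = i ∧ pget l pr.2 = "_" then PySem.List.pySetD acc2 pr.2 "p"
            else if pr.2 = i ∧ pget l pr.1 = "_" then PySem.List.pySetD acc2 pr.1 "p"
            else acc2) acc
        else acc) (MkL l S)
      = MkL l (is.flatMap (oc l pairs) ++ S) := by
  induction is with
  | nil => intro S; simp
  | cons i is' ih =>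
    intro S
    simp only [List.foldl_cons, List.flatMap_cons]
    by_cases hP : pget l i = "P"
    · rw [if_pos hP, foldA_inner l i pairs S, ← List.append_nil (pairs.flatMap (cA l i) ++ S),
        List.append_assoc, ← MkL_congr (l := l) (fun j => Iff.rfl), ih]
      apply MkL_congr; intro j
      simp only [oc, if_pos hP, List.mem_append]
      tauto
    · rw [if_neg hP, ih]
      apply MkL_congr; intro j
      simp only [oc, if_neg hP, List.nil_append, List.mem_append]

theorem foldA_outer' (l : List String) (pairs : List (Int × Int)) (is : List Int) :
    is.foldl (fun acc i =>
        if pget l i = "P" then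
          pairs.foldl (fun acc2 pr =>
            if pr.1 = i ∧ pget l pr.2 = "_" then PySem.List.pySetD acc2 pr.2 "p"
            else if pr.2 = i ∧ pget l pr.1 = "_" then PySem.List.pySetD acc2 pr.1 "p"
            else acc2) acc
        else acc) l
      = MkL l (is.flatMap (oc l pairs)) := by
  have h := foldA_outer l pairs is []
  rw [MkL_nil, List.append_nil] at h
  exact h

theorem inner_range_eq (pocket : List String) (pairs : List (Int × Int)) (i : Int)
    (acc : List String) :
    (PySem.List.pyRange 0 (pairs.length : Int) 1).foldl (fun acc2 k =>
      if (PySem.List.pyGetD pairs k (0, 0)).1 = i ∧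
          pget pocket (PySem.List.pyGetD pairs k (0, 0)).2 = "_" then
        PySem.List.pySetD acc2 (PySem.List.pyGetD pairs k (0, 0)).2 "p"
      else if (PySem.List.pyGetD pairs k (0, 0)).2 = i ∧
          pget pocket (PySem.List.pyGetD pairs k (0, 0)).1 = "_" then
        PySem.List.pySetD acc2 (PySem.List.pyGetD pairs k (0, 0)).1 "p"
      else acc2) acc
    = pairs.foldl (fun acc2 pr =>
      if pr.1 = i ∧ pget pocket pr.2 = "_" then PySem.List.pySetD acc2 pr.2 "p"
      else if pr.2 = i ∧ pget pocket pr.1 = "_" then PySem.List.pySetD acc2 pr.1 "p"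
      else acc2) acc :=
  PySem.List.foldl_pyRange_zero_pyGetD' pairs (0, 0) (fun acc2 pr =>
      if pr.1 = i ∧ pget pocket pr.2 = "_" then PySem.List.pySetD acc2 pr.2 "p"
      else if pr.2 = i ∧ pget pocket pr.1 = "_" then PySem.List.pySetD acc2 pr.1 "p"
      else acc2) acc

-- membership in B's set of 'P' positions
theorem mem_ppos (l : List String) (x : Int) :
    PySem.Set.contains (pposB l) x = true ↔ (0 ≤ x ∧ x < l.length ∧ pget l x = "P") := by
  rw [PySem.Set.contains_iff, PySem.Set.mem_ofList, List.mem_map]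
  constructor
  · rintro ⟨jc, hjc, hx⟩
    rw [List.mem_filter, PySem.List.mem_enumerate_iff] at hjc
    obtain ⟨⟨k, hk, hjck⟩, hP⟩ := hjc
    subst hjck
    simp only [beq_iff_eq] at hP
    simp only [zero_add] at hx
    subst hx
    refine ⟨Int.natCast_nonneg k, by exact_mod_cast hk, ?_⟩
    have hg : pget l ((k : Nat) : Int) = l[k] := by
      unfold pget
      rw [PySem.List.pyGetD_eq_getElem l "" (Int.natCast_nonneg k)
        (by exact_mod_cast hk)]
      simp
    rw [hg]; exact hP
  · rintro ⟨h0, hn, hP⟩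
    have hk : x.toNat < l.length := by omega
    have hg : pget l x = l[x.toNat] := PySem.List.pyGetD_eq_getElem l "" h0 hn
    refine ⟨((x.toNat : Int), l[x.toNat]), ?_, by simp; omega⟩
    rw [List.mem_filter, PySem.List.mem_enumerate_iff]
    refine ⟨⟨x.toNat, hk, by simp⟩, ?_⟩
    simp only [beq_iff_eq]
    rw [← hg]; exact hP

-- contribution of pair p in B's single pass (second write first: it ends up in front of the cons list)
def cB (l : List String) (p : Int × Int) : List Int :=
  (if PySem.Set.contains (pposB l) p.2 && (pget l p.1 == "_")
   then [PySem.Int.mod p.1 l.length] else []) ++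
  (if PySem.Set.contains (pposB l) p.1 && (pget l p.2 == "_")
   then [PySem.Int.mod p.2 l.length] else [])

theorem foldB (l : List String) (pairs : List (Int × Int)) :
    ∀ S : List Int,
      pairs.foldl (fun out p =>
        let out1 := if PySem.Set.contains (pposB l) p.1 && (pget l p.2 == "_")
                    then PySem.List.pySetD out p.2 "p" else out
        if PySem.Set.contains (pposB l) p.2 && (pget l p.1 == "_")
        then PySem.List.pySetD out1 p.1 "p" else out1) (MkL l S)
      = MkL l (pairs.flatMap (cB l) ++ S) := by
  induction pairs with
  | nil => intro S; simp
  | cons p ps ih =>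
    intro S
    simp only [List.foldl_cons, List.flatMap_cons]
    by_cases h1 : (PySem.Set.contains (pposB l) p.1 && (pget l p.2 == "_")) = true
    · have hu2 : pget l p.2 = "_" := by
        have := (Bool.and_eq_true _ _).mp h1
        exact beq_iff_eq.mp this.2
      by_cases h2 : (PySem.Set.contains (pposB l) p.2 && (pget l p.1 == "_")) = true
      · have hu1 : pget l p.1 = "_" := by
          have := (Bool.and_eq_true _ _).mp h2
          exact beq_iff_eq.mp this.2
        rw [if_pos h1, if_pos h2, pySetD_MkL l S p.2 hu2,
          pySetD_MkL l _ p.1 hu1, ih]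
        apply MkL_congr; intro j
        simp only [cB, if_pos h1, if_pos h2, List.mem_append, List.mem_cons]
        tauto
      · rw [if_pos h1, if_neg h2, pySetD_MkL l S p.2 hu2, ih]
        apply MkL_congr; intro j
        simp only [cB, if_pos h1, if_neg h2, List.nil_append, List.mem_append, List.mem_cons]
        tauto
    · rw [if_neg h1]
      by_cases h2 : (PySem.Set.contains (pposB l) p.2 && (pget l p.1 == "_")) = true
      · have hu1 : pget l p.1 = "_" := by
          have := (Bool.and_eq_true _ _).mp h2
          exact beq_iff_eq.mp this.2
        rw [if_pos h2, pySetD_MkL l S p.1 hu1, ih]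
        apply MkL_congr; intro j
        simp only [cB, if_neg h1, if_pos h2, List.append_nil, List.mem_append, List.mem_cons]
        tauto
      · rw [if_neg h2, ih]
        apply MkL_congr; intro j
        simp only [cB, if_neg h1, if_neg h2, List.nil_append, List.mem_append]

theorem mem_final (l : List String) (pairs : List (Int × Int)) (j : Int) :
    j ∈ (PySem.List.pyRange 0 (l.length : Int) 1).flatMap (oc l pairs) ↔
    j ∈ pairs.flatMap (cB l) := by
  simp only [List.mem_flatMap, PySem.List.mem_pyRange_one]
  constructor
  · rintro ⟨i, ⟨hi0, hin⟩, hj⟩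
    unfold oc at hj
    by_cases hP : pget l i = "P"
    · rw [if_pos hP] at hj
      rw [List.mem_flatMap] at hj
      obtain ⟨p, hp, hjp⟩ := hj
      refine ⟨p, hp, ?_⟩
      unfold cA at hjp
      unfold cB
      by_cases h1 : p.1 = i ∧ pget l p.2 = "_"
      · rw [if_pos h1, List.mem_singleton] at hjp
        have hc : (PySem.Set.contains (pposB l) p.1 && (pget l p.2 == "_")) = true := by
          rw [Bool.and_eq_true, beq_iff_eq]
          exact ⟨(mem_ppos l p.1).mpr ⟨h1.1 ▸ hi0, h1.1 ▸ hin, h1.1 ▸ hP⟩, h1.2⟩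
        rw [List.mem_append]
        right
        rw [if_pos hc, List.mem_singleton]
        exact hjp
      · rw [if_neg h1] at hjp
        by_cases h2 : p.2 = i ∧ pget l p.1 = "_"
        · rw [if_pos h2, List.mem_singleton] at hjp
          have hc : (PySem.Set.contains (pposB l) p.2 && (pget l p.1 == "_")) = true := by
            rw [Bool.and_eq_true, beq_iff_eq]
            exact ⟨(mem_ppos l p.2).mpr ⟨h2.1 ▸ hi0, h2.1 ▸ hin, h2.1 ▸ hP⟩, h2.2⟩
          rw [List.mem_append]
          left
          rw [if_pos hc, List.mem_singleton]
          exact hjp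
        · rw [if_neg h2] at hjp; simp at hjp
    · rw [if_neg hP] at hj; simp at hj
  · rintro ⟨p, hp, hj⟩
    unfold cB at hj
    rw [List.mem_append] at hj
    rcases hj with hj | hj
    · by_cases h2 : (PySem.Set.contains (pposB l) p.2 && (pget l p.1 == "_")) = true
      · rw [if_pos h2, List.mem_singleton] at hj
        obtain ⟨hcont, hund⟩ := (Bool.and_eq_true _ _).mp h2
        obtain ⟨hb0, hbn, hbP⟩ := (mem_ppos l p.2).mp hcont
        have ha : pget l p.1 = "_" := beq_iff_eq.mp hund
        refine ⟨p.2, ⟨hb0, hbn⟩, ?_⟩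
        unfold oc
        rw [if_pos hbP, List.mem_flatMap]
        refine ⟨p, hp, ?_⟩
        unfold cA
        rw [if_neg (by rintro ⟨e1, e2⟩; rw [hbP] at e2; exact absurd e2 (by decide)),
          if_pos ⟨rfl, ha⟩, List.mem_singleton]
        exact hj
      · rw [if_neg h2] at hj; simp at hj
    · by_cases h1 : (PySem.Set.contains (pposB l) p.1 && (pget l p.2 == "_")) = true
      · rw [if_pos h1, List.mem_singleton] at hj
        obtain ⟨hcont, hund⟩ := (Bool.and_eq_true _ _).mp h1
        obtain ⟨ha0, han, haP⟩ := (mem_ppos l p.1).mp hcont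
        have hb : pget l p.2 = "_" := beq_iff_eq.mp hund
        refine ⟨p.1, ⟨ha0, han⟩, ?_⟩
        unfold oc
        rw [if_pos haP, List.mem_flatMap]
        refine ⟨p, hp, ?_⟩
        unfold cA
        rw [if_pos ⟨rfl, hb⟩, List.mem_singleton]
        exact hj
      · rw [if_neg h1] at hj; simp at hj

-- ===== VERDICT (by name: the statement is the Claim_ definition above) =====
theorem add_small_p_spec : Claim_equal_add_small_p := by
  intro l pairs _hdom _hpre
  unfold Spec_add_small_p add_small_p add_small_p_alt
  simp only [PySem.List.len_eq]
  refine congrArg (PySem.Str.join "") ?_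
  have hB : pairs.foldl (fun out p =>
      let out1 := if PySem.Set.contains (pposB l) p.1 && (pget l p.2 == "_")
                  then PySem.List.pySetD out p.2 "p" else out
      if PySem.Set.contains (pposB l) p.2 && (pget l p.1 == "_")
      then PySem.List.pySetD out1 p.1 "p" else out1) l
      = MkL l (pairs.flatMap (cB l)) := by
    have h := foldB l pairs []
    rw [MkL_nil, List.append_nil] at h
    exact h
  rw [hB]
  refine Eq.trans (PySem.List.foldl_congr_mem _ _ (fun (acc : List String) (i : Int) =>
      if PySem.List.pyGetD l i "" = "P" then
        pairs.foldl (fun acc2 pr =>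
          if pr.1 = i ∧ PySem.List.pyGetD l pr.2 "" = "_" then PySem.List.pySetD acc2 pr.2 "p"
          else if pr.2 = i ∧ PySem.List.pyGetD l pr.1 "" = "_" then PySem.List.pySetD acc2 pr.1 "p"
          else acc2) acc
      else acc) _ ?_)
    (Eq.trans (foldA_outer' l pairs _) (MkL_congr (fun j => mem_final l pairs j)))
  intro acc i _
  dsimp only
  by_cases hP : PySem.List.pyGetD l i "" = "P"
  · rw [if_pos hP, if_pos hP]
    exact inner_range_eq l pairs i acc
  · rw [if_neg hP, if_neg hP]
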